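-- pv_equiv track=rewrite | github.com/HallvardMM/ITGK | Ovinger/Oving eksamen/Eksamen 2018 kont.py | sumTeamValues
-- ===== SOURCE A (Python) =====
-- def calculateScores(homeGoals, awayGoals):
--     if homeGoals>awayGoals:
--         hjemme=3
--         borte=0
--     elif homeGoals<awayGoals:
--         hjemme=0
--         borte=3
--     else:
--         hjemme=1
--         borte=1
--     return hjemme,borte
--
-- def sumTeamValues(analyzed):
--     output={}
--     for element in analyzed:
--         hjemme,borte=element[0],element[1]
--         hjemmep,bortep=calculateScores(element[2],element[3])
--         if hjemme in output:
--             output[hjemme] = [output[hjemme][0] + hjemmep,output[hjemme][1] + 1]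
--         else:
--             output[hjemme] = [hjemmep, 1]
--         if borte in output:
--             output[borte] = [output[borte][0] + bortep, output[borte][1] + 1]
--         else:
--             output[borte] = [bortep, 1]
--     return output
-- ===== SOURCE B (Python) =====
-- def sumTeamValues(analyzed):
--     # pass 1: list of teams in first-appearance order (home before away)
--     teams = []
--     for element in analyzed:
--         if element[0] not in teams:
--             teams.append(element[0])
--         if element[1] not in teams:
--             teams.append(element[1])
--     # pass 2: per team, scan all matches and total its points and games
--     output = {}
--     for t in teams:
--         pts = 0
--         games = 0
--         for home, away, hg, ag in analyzed:
--             if home == t: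
--                 pts += 3 * (hg > ag) + (hg == ag)
--                 games += 1
--             if away == t:
--                 pts += 3 * (ag > hg) + (hg == ag)
--                 games += 1
--         output[t] = [pts, games]
--     return output
-- ===== Notes on version B (the rewrite author's own statement) =====
-- stated objective: alternative
-- what changed: B replaces A's single-pass dict accumulation with a team-centric nested scan: it first collects the distinct teams in first-appearance order, then for each team re-scans the whole match list totalling its points (via the arithmetic formula 3*(win)+(draw)) and game count, writing each dict entry exactly once.
import Mathlib
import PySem

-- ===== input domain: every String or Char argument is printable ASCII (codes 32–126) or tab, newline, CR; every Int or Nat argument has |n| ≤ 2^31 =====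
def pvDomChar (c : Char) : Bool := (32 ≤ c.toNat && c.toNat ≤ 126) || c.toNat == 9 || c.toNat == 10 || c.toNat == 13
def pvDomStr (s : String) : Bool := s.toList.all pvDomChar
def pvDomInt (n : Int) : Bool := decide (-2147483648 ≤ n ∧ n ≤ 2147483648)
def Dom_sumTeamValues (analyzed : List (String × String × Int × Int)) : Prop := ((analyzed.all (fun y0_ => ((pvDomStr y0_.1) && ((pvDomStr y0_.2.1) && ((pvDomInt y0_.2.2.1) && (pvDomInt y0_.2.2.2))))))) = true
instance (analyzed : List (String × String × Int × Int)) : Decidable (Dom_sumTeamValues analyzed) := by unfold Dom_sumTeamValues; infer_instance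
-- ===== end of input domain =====

-- B replaces A's single-pass dict accumulation by a team-centric nested scan: collect distinct teams first, then total each team's points/games by re-scanning all matches ("alternative", not faster).


-- ===== PORT A =====
def calculateScores (homeGoals awayGoals : Int) : Int × Int :=
  if homeGoals > awayGoals then (3, 0)
  else if homeGoals < awayGoals then (0, 3)
  else (1, 1)

-- one 'if team in output: … else: …' update of A's loop body
-- (A's values are always two-element lists, so v[0]/v[1] are rendered as pyGet? with default 0)
def pvAUpd (d : PySem.Dict String (List Int)) (t : String) (p : Int) : PySem.Dict String (List Int) :=
  if d.contains t then
    d.insert t [(PySem.List.pyGet? (d.getD t []) 0).getD 0 + p,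
                (PySem.List.pyGet? (d.getD t []) 1).getD 0 + 1]
  else
    d.insert t [p, 1]

def sumTeamValues (analyzed : List (String × String × Int × Int)) : List (String × List Int) :=
  (analyzed.foldl
    (fun output element =>
      let hjemme := element.1
      let borte := element.2.1
      let hb := calculateScores element.2.2.1 element.2.2.2
      pvAUpd (pvAUpd output hjemme hb.1) borte hb.2)
    PySem.Dict.empty).items

-- ===== PORT B =====
-- pass 1 loop body: record each team on first appearance (home before away)
def pvTeamStep (ts : List String) (e : String × String × Int × Int) : List String :=
  let ts1 := if ts.contains e.1 then ts else ts ++ [e.1]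
  if ts1.contains e.2.1 then ts1 else ts1 ++ [e.2.1]

def pvTeams (analyzed : List (String × String × Int × Int)) : List String :=
  analyzed.foldl pvTeamStep []

-- pass 2 inner loop body: add match e's contribution to team t's (points, games)
def pvStatStep (t : String) (pg : Int × Int) (e : String × String × Int × Int) : Int × Int :=
  let pg1 := if e.1 == t
    then (pg.1 + (3 * (if e.2.2.1 > e.2.2.2 then (1:Int) else 0) + (if e.2.2.1 == e.2.2.2 then 1 else 0)), pg.2 + 1)
    else pg
  if e.2.1 == t
    then (pg1.1 + (3 * (if e.2.2.2 > e.2.2.1 then (1:Int) else 0) + (if e.2.2.1 == e.2.2.2 then 1 else 0)), pg1.2 + 1)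
    else pg1

def pvStat (t : String) (analyzed : List (String × String × Int × Int)) : Int × Int :=
  analyzed.foldl (pvStatStep t) (0, 0)

def sumTeamValues_alt (analyzed : List (String × String × Int × Int)) : List (String × List Int) :=
  ((pvTeams analyzed).foldl
    (fun output t => output.insert t [(pvStat t analyzed).1, (pvStat t analyzed).2])
    PySem.Dict.empty).items

-- ===== PRECONDITION & SPEC =====
def Spec_sumTeamValues (analyzed : List (String × String × Int × Int)) (out : List (String × List Int)) : Prop := out = sumTeamValues_alt analyzed
instance (analyzed : List (String × String × Int × Int)) (out : List (String × List Int)) : Decidable (Spec_sumTeamValues analyzed out) := by unfold Spec_sumTeamValues; infer_instance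

-- ===== CLAIM (what is proved, stated in full; the proofs are below) =====
def Claim_equal_sumTeamValues : Prop := ∀ (analyzed : List (String × String × Int × Int)), Dom_sumTeamValues analyzed → Spec_sumTeamValues analyzed (sumTeamValues analyzed)

-- ===== LEMMAS AND PROOFS =====

-- accumulated points / games already stored for t in the dict
def pvB0 (d : PySem.Dict String (List Int)) (t : String) : Int :=
  (PySem.List.pyGet? (d.getD t []) 0).getD 0
def pvB1 (d : PySem.Dict String (List Int)) (t : String) : Int :=
  (PySem.List.pyGet? (d.getD t []) 1).getD 0

theorem pyGet?_pair0 (a b : Int) : (PySem.List.pyGet? [a, b] 0).getD 0 = a := by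
  simp [PySem.List.pyGet?, PySem.List.pyIdx?]
theorem pyGet?_pair1 (a b : Int) : (PySem.List.pyGet? [a, b] 1).getD 0 = b := by
  simp [PySem.List.pyGet?, PySem.List.pyIdx?]
theorem pyGet?_nil (i : Int) : (PySem.List.pyGet? ([] : List Int) i).getD 0 = 0 := by
  simp [PySem.List.pyGet?, PySem.List.pyIdx?]

theorem pvB0_upd (d : PySem.Dict String (List Int)) (k : String) (p : Int) (t : String) :
    pvB0 (pvAUpd d k p) t = pvB0 d t + (if k = t then p else 0) := by
  unfold pvAUpd pvB0
  by_cases hc : d.contains k = true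
  · simp only [hc, if_true, PySem.Dict.getD_insert]
    by_cases h : k = t
    · rw [if_pos h.symm, if_pos h, ← h, pyGet?_pair0]
    · rw [if_neg (fun hh => h hh.symm), if_neg h, add_zero]
  · have hcf : d.contains k = false := by simpa using hc
    simp only [hc, if_false, PySem.Dict.getD_insert, Bool.false_eq_true]
    by_cases h : k = t
    · rw [if_pos h.symm, if_pos h, ← h, PySem.Dict.getD_of_not_contains _ _ hcf, pyGet?_pair0, pyGet?_nil]
      ring
    · rw [if_neg (fun hh => h hh.symm), if_neg h, add_zero]

theorem pvB1_upd (d : PySem.Dict String (List Int)) (k : String) (p : Int) (t : String) :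
    pvB1 (pvAUpd d k p) t = pvB1 d t + (if k = t then 1 else 0) := by
  unfold pvAUpd pvB1
  by_cases hc : d.contains k = true
  · simp only [hc, if_true, PySem.Dict.getD_insert]
    by_cases h : k = t
    · rw [if_pos h.symm, if_pos h, ← h, pyGet?_pair1]
    · rw [if_neg (fun hh => h hh.symm), if_neg h, add_zero]
  · have hcf : d.contains k = false := by simpa using hc
    simp only [hc, if_false, PySem.Dict.getD_insert, Bool.false_eq_true]
    by_cases h : k = t
    · rw [if_pos h.symm, if_pos h, ← h, PySem.Dict.getD_of_not_contains _ _ hcf, pyGet?_pair1, pyGet?_nil]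
      ring
    · rw [if_neg (fun hh => h hh.symm), if_neg h, add_zero]

-- A's per-match update keyed list = pvTeamStep on the dict's key list
theorem keys_pvAUpd (d : PySem.Dict String (List Int)) (k : String) (p : Int) :
    (pvAUpd d k p).keys = if d.keys.contains k then d.keys else d.keys ++ [k] := by
  unfold pvAUpd
  by_cases hc : d.contains k = true
  · have hk : d.keys.contains k = true := by
      simpa [List.contains_iff_mem] using (PySem.Dict.contains_iff_mem_keys d k).1 hc
    rw [if_pos hc, if_pos hk, PySem.Dict.keys_insert_of_contains _ _ hc]
  · have hcf : d.contains k = false := by simpa using hc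
    have hk : d.keys.contains k = false := by
      rw [Bool.eq_false_iff]
      intro hmem
      exact hc ((PySem.Dict.contains_iff_mem_keys d k).2 (by simpa [List.contains_iff_mem] using hmem))
    rw [if_neg hc, PySem.Dict.keys_insert_of_not_contains _ _ hcf]
    have hm : k ∉ d.keys := fun hmem => hc ((PySem.Dict.contains_iff_mem_keys d k).2 hmem)
    simp [hm]

-- pvStatStep acts on the accumulator by componentwise addition
theorem pvStatStep_shift (t : String) (c : Int × Int) (e : String × String × Int × Int) :
    pvStatStep t c e = (c.1 + (pvStatStep t (0, 0) e).1, c.2 + (pvStatStep t (0, 0) e).2) := by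
  unfold pvStatStep
  split_ifs <;> apply Prod.ext <;> simp <;> ring

theorem pvStat_shift (t : String) (l : List (String × String × Int × Int)) (c : Int × Int) :
    l.foldl (pvStatStep t) c = (c.1 + (pvStat t l).1, c.2 + (pvStat t l).2) := by
  induction l generalizing c with
  | nil => simp [pvStat]
  | cons e rest ih =>
    have h1 : List.foldl (pvStatStep t) c (e :: rest) = List.foldl (pvStatStep t) (pvStatStep t c e) rest := rfl
    have h2 : pvStat t (e :: rest) = List.foldl (pvStatStep t) (pvStatStep t (0, 0) e) rest := rfl
    rw [h1, ih, h2, ih, pvStatStep_shift t c e]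
    apply Prod.ext <;> simp <;> ring

theorem pvStat_cons (t : String) (e : String × String × Int × Int) (rest : List (String × String × Int × Int)) :
    pvStat t (e :: rest) = ((pvStatStep t (0, 0) e).1 + (pvStat t rest).1,
      (pvStatStep t (0, 0) e).2 + (pvStat t rest).2) := by
  have h2 : pvStat t (e :: rest) = List.foldl (pvStatStep t) (pvStatStep t (0, 0) e) rest := rfl
  rw [h2, pvStat_shift, pvStatStep_shift t (0, 0) e]

-- the two scoring formulas agree
theorem pvB_adds (d : PySem.Dict String (List Int)) (e : String × String × Int × Int) (t : String) :
    pvB0 (pvAUpd (pvAUpd d e.1 (calculateScores e.2.2.1 e.2.2.2).1) e.2.1 (calculateScores e.2.2.1 e.2.2.2).2) t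
      = pvB0 d t + (pvStatStep t (0, 0) e).1
    ∧ pvB1 (pvAUpd (pvAUpd d e.1 (calculateScores e.2.2.1 e.2.2.2).1) e.2.1 (calculateScores e.2.2.1 e.2.2.2).2) t
      = pvB1 d t + (pvStatStep t (0, 0) e).2 := by
  rw [pvB0_upd, pvB0_upd, pvB1_upd, pvB1_upd]
  constructor <;>
  · simp only [pvStatStep, calculateScores, beq_iff_eq]
    by_cases h1 : e.1 = t <;> by_cases h2 : e.2.1 = t <;>
      simp [h1, h2] <;> (try split_ifs) <;> (try simp) <;> omega

-- dict values produced by A's loop are always two-element lists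
def pvTwoElem (d : PySem.Dict String (List Int)) : Prop :=
  ∀ p ∈ d.items, ∃ a b : Int, p.2 = [a, b]

theorem nodup_keys_pvAUpd (d : PySem.Dict String (List Int)) (k : String) (p : Int)
    (h : d.keys.Nodup) : (pvAUpd d k p).keys.Nodup := by
  unfold pvAUpd
  split_ifs <;> exact PySem.Dict.nodup_keys_insert _ _ _ h

theorem pvTwoElem_pvAUpd (d : PySem.Dict String (List Int)) (k : String) (p : Int)
    (h : pvTwoElem d) : pvTwoElem (pvAUpd d k p) := by
  intro q hq
  unfold pvAUpd at hq
  split_ifs at hq <;>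
    rcases (PySem.Dict.mem_items_insert _ _ _ _).1 hq with h1 | ⟨h1, _⟩ <;>
    first
    | exact ⟨_, _, by rw [h1]⟩
    | exact h _ h1

-- main invariant: A's loop, started from any well-formed dict, produces
-- the team list (continued from the dict's keys) with per-team running totals
theorem pvA_invariant (l : List (String × String × Int × Int)) :
    ∀ d : PySem.Dict String (List Int), d.keys.Nodup → pvTwoElem d →
    (l.foldl
      (fun output element =>
        let hjemme := element.1
        let borte := element.2.1
        let hb := calculateScores element.2.2.1 element.2.2.2
        pvAUpd (pvAUpd output hjemme hb.1) borte hb.2) d).items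
      = (l.foldl pvTeamStep d.keys).map
          (fun t => (t, [pvB0 d t + (pvStat t l).1, pvB1 d t + (pvStat t l).2])) := by
  induction l with
  | nil =>
    intro d hnd htwo
    simp only [List.foldl_nil, pvStat, List.foldl_nil]
    rw [PySem.Dict.items_eq_map_keys d hnd []]
    apply List.map_congr_left
    intro k hk
    rcases List.mem_map.1 (by simpa only [PySem.Dict.keys] using hk) with ⟨q, hq, rfl⟩
    rcases htwo q hq with ⟨a, b, hab⟩
    have hgd : d.getD q.1 [] = q.2 := by
      have : (q.1, q.2) ∈ d.items := by simpa using hq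
      exact PySem.Dict.getD_of_mem_items d this hnd []
    unfold pvB0 pvB1
    rw [hgd, hab, pyGet?_pair0, pyGet?_pair1]
    simp
  | cons e rest ih =>
    intro d hnd htwo
    set d' := pvAUpd (pvAUpd d e.1 (calculateScores e.2.2.1 e.2.2.2).1) e.2.1 (calculateScores e.2.2.1 e.2.2.2).2 with hd'
    have hnd' : d'.keys.Nodup := by
      rw [hd']
      exact nodup_keys_pvAUpd _ _ _ (nodup_keys_pvAUpd _ _ _ hnd)
    have htwo' : pvTwoElem d' := by
      rw [hd']
      exact pvTwoElem_pvAUpd _ _ _ (pvTwoElem_pvAUpd _ _ _ htwo)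
    have hkeys : d'.keys = pvTeamStep d.keys e := by
      rw [hd']
      unfold pvTeamStep
      rw [keys_pvAUpd, keys_pvAUpd]
    simp only [List.foldl_cons]
    rw [← hd', ih d' hnd' htwo', hkeys]
    apply List.map_congr_left
    intro t _
    have hb := pvB_adds d e t
    rw [← hd'] at hb
    rw [hb.1, hb.2, pvStat_cons]
    simp [add_assoc]

-- the team list has no duplicates
theorem nodup_addIf (ts : List String) (x : String) (h : ts.Nodup) :
    (if ts.contains x then ts else ts ++ [x]).Nodup := by
  split_ifs with h1
  · exact h
  · have hx : x ∉ ts := by simpa [List.contains_iff_mem] using h1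
    simp [List.nodup_append, h]
    exact fun a ha hax => hx (hax ▸ ha)

theorem pvTeams_nodup (l : List (String × String × Int × Int)) :
    ∀ acc : List String, acc.Nodup → (l.foldl pvTeamStep acc).Nodup := by
  induction l with
  | nil => intro acc h; simpa using h
  | cons e rest ih =>
    intro acc h
    apply ih
    exact nodup_addIf _ _ (nodup_addIf _ _ h)

-- ===== VERDICT (by name: the statement is the Claim_ definition above) =====
theorem sumTeamValues_spec : Claim_equal_sumTeamValues := by
  intro analyzed _
  unfold Spec_sumTeamValues sumTeamValues sumTeamValues_alt
  have hA := pvA_invariant analyzed PySem.Dict.empty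
    (by simp [PySem.Dict.keys, PySem.Dict.empty])
    (by intro p hp; simp [PySem.Dict.empty] at hp)
  have hB := PySem.Dict.items_foldl_insert_fresh (pvTeams analyzed)
    (fun t => t) (fun t => [(pvStat t analyzed).1, (pvStat t analyzed).2]) PySem.Dict.empty
    (by intro a _; simp [PySem.Dict.contains_empty])
    (by simpa using pvTeams_nodup analyzed [] List.nodup_nil)
  rw [hA, hB]
  have h0 : ∀ t : String, pvB0 PySem.Dict.empty t = 0 := fun t => by
    unfold pvB0; rw [PySem.Dict.getD_empty, pyGet?_nil]
  have h1 : ∀ t : String, pvB1 PySem.Dict.empty t = 0 := fun t => by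
    unfold pvB1; rw [PySem.Dict.getD_empty, pyGet?_nil]
  have hk : (PySem.Dict.empty : PySem.Dict String (List Int)).keys = [] := rfl
  have hi : (PySem.Dict.empty : PySem.Dict String (List Int)).items = [] := rfl
  simp [h0, h1, pvTeams, hk, hi]
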